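-- pv_equiv track=rewrite | github.com/pypi-data/pypi-mirror-402 | packages/nazara/nazara-0.1.0-py3-none-any.whl/nazara/ingestion/infrastructure/readers/datadog_reader.py | _extract_service_env
-- ===== SOURCE A (Python) =====
-- def _extract_service_env(tags: list[str]) -> tuple[str, str]:
--     service = "unknown"
--     environment = "production"
--     for tag in tags:
--         if isinstance(tag, str):
--             if tag.startswith("service:"):
--                 service = tag.split(":", 1)[1]
--             elif tag.startswith("env:"):
--                 environment = tag.split(":", 1)[1]
--     return service, environment
-- ===== SOURCE B (Python) =====
-- def _extract_service_env(tags: list[str]) -> tuple[str, str]: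
--     def _last(prefix: str, default: str) -> str:
--         for tag in reversed(tags):
--             if isinstance(tag, str) and tag.startswith(prefix):
--                 return tag[len(prefix):]
--         return default
--     return _last("service:", "unknown"), _last("env:", "production")
-- ===== Notes on version B (the rewrite author's own statement) =====
-- stated objective: alternative
-- what changed: B replaces A's forward fold with elif branches over a running (service, env) pair by two backward scans: for each prefix it finds the last matching tag (first match of reversed(tags)) with early exit and returns its suffix tag[len(prefix):], falling back to the default; correct because A's loop keeps exactly the last matching tag's suffix for each key.
import Mathlib
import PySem

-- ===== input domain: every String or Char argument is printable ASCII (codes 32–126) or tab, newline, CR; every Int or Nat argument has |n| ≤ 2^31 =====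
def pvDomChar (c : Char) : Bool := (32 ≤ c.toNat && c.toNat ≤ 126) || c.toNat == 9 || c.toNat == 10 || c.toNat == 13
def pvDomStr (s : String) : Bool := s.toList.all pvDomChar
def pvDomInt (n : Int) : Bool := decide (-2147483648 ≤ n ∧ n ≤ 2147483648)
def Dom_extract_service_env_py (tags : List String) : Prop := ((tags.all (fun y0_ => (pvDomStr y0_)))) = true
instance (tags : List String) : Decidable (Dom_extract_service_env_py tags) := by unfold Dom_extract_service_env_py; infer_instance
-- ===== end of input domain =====

-- B replaces A's forward elif fold over a running pair by two backward scans, each returning the last matching tag's suffix (alternative decomposition, same cost).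

-- ===== PORT A =====
-- loop body of A's for-loop (the isinstance(tag, str) test is always true: tags : List String)
def pvStepA (st : String × String) (tag : String) : String × String :=
  if PySem.Str.startswith tag "service:" then
    (PySem.List.pyGetD ((PySem.Str.splitMax? tag ":" 1).getD []) 1 "", st.2)
  else if PySem.Str.startswith tag "env:" then
    (st.1, PySem.List.pyGetD ((PySem.Str.splitMax? tag ":" 1).getD []) 1 "")
  else st

def extract_service_env_py (tags : List String) : String × String :=
  tags.foldl pvStepA ("unknown", "production")

-- ===== PORT B =====
-- B's helper _last: scan reversed(tags) for the first tag starting with prefix (early return of tag[len(prefix):]), else default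
def pvLast (pfx dflt : String) (tags : List String) : String :=
  match tags.reverse.find? (fun tag => PySem.Str.startswith tag pfx) with
  | some tag => PySem.Str.slice tag (some (PySem.Str.len pfx)) none
  | none => dflt

def extract_service_env_py_alt (tags : List String) : String × String :=
  (pvLast "service:" "unknown" tags, pvLast "env:" "production" tags)

-- ===== PRECONDITION & SPEC =====
def Spec_extract_service_env_py (tags : List String) (out : String × String) : Prop := out = extract_service_env_py_alt tags
instance (tags : List String) (out : String × String) : Decidable (Spec_extract_service_env_py tags out) := by unfold Spec_extract_service_env_py; infer_instance

-- ===== CLAIM (what is proved, stated in full; the proofs are below) =====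
def Claim_equal_extract_service_env_py : Prop := ∀ (tags : List String), Dom_extract_service_env_py tags → Spec_extract_service_env_py tags (extract_service_env_py tags)

-- ===== LEMMAS AND PROOFS =====

-- splitOnMax.go with maxsplit exhausted returns the rest as the final piece
lemma pv_go_zero (fuel : Nat) (l cur : List Char) (acc : List (List Char)) :
    PySem.Chars.splitOnMax.go [':'] fuel 0 l cur acc = ((cur.reverse ++ l) :: acc).reverse := by
  cases fuel with
  | zero => rw [PySem.Chars.splitOnMax.go.eq_def]
  | succ n =>
    cases l with
    | nil => rw [PySem.Chars.splitOnMax.go.eq_def]; simp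
    | cons c rest => rw [PySem.Chars.splitOnMax.go.eq_def]; simp

-- splitOnMax.go with maxsplit 1 on k ++ ':' :: r (no ':' in k) splits there
lemma pv_go_one (fuel : Nat) (k r cur : List Char) (acc : List (List Char))
    (hf : k.length + r.length < fuel) (hk : ':' ∉ k) :
    PySem.Chars.splitOnMax.go [':'] fuel 1 (k ++ ':' :: r) cur acc =
      acc.reverse ++ [cur.reverse ++ k, r] := by
  induction fuel generalizing k cur acc with
  | zero => omega
  | succ n ih =>
    cases k with
    | nil =>
      rw [PySem.Chars.splitOnMax.go.eq_def]
      simp [List.isPrefixOf, pv_go_zero]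
    | cons c kt =>
      have hc : ¬(c = ':') := fun h => hk (by simp [h])
      rw [PySem.Chars.splitOnMax.go.eq_def]
      simp only [List.cons_append, List.isPrefixOf]
      rw [ih kt (c :: cur) acc (by simp at hf ⊢; omega) (fun h => hk (List.mem_cons_of_mem _ h))]
      simp
      intro h
      exact absurd h.symm hc

-- tag.split(":", 1)[1] for a tag of shape k ++ ':' :: r with no ':' in k
lemma pv_split_val (t : String) (k r : List Char) (hk : ':' ∉ k)
    (ht : t.toList = k ++ ':' :: r) :
    PySem.List.pyGetD ((PySem.Str.splitMax? t ":" 1).getD []) 1 "" = String.ofList r := by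
  unfold PySem.Str.splitMax? PySem.Chars.splitMax?
  rw [if_neg (by simp)]
  show PySem.List.pyGetD (List.map String.ofList (PySem.Chars.splitOnMax t.toList [':'] 1)) 1 "" = _
  unfold PySem.Chars.splitOnMax
  rw [if_neg (by omega), show ((1 : Int)).toNat = 1 from rfl, ht]
  rw [show (k ++ ':' :: r).length + 1 = k.length + r.length + 2 by simp; omega]
  rw [pv_go_one (k.length + r.length + 2) k r [] [] (by omega) hk]
  rfl

-- tag[len(pfx):] for a tag with prefix pfx is the rest of the tag
lemma pv_slice_val (t : String) (p r : List Char) (ht : t.toList = p ++ r) :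
    PySem.Str.slice t (some ((p.length : Nat) : Int)) none = String.ofList r := by
  unfold PySem.Str.slice
  congr 1
  rw [PySem.Chars.slice_eq_listSlice, PySem.List.slice_from_natCast, ht]
  simp

-- a tag starting with prefix pfx decomposes as pfx ++ rest
lemma pv_serv_decomp (t : String) (h : PySem.Str.startswith t "service:" = true) :
    ∃ r, t.toList = "service".toList ++ ':' :: r := by
  rw [PySem.Str.startswith_eq] at h
  rcases (PySem.Chars.startswith_iff _ _).mp h with ⟨r, hr⟩
  exact ⟨r, by rw [← hr]; rfl⟩

lemma pv_env_decomp (t : String) (h : PySem.Str.startswith t "env:" = true) :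
    ∃ r, t.toList = "env".toList ++ ':' :: r := by
  rw [PySem.Str.startswith_eq] at h
  rcases (PySem.Chars.startswith_iff _ _).mp h with ⟨r, hr⟩
  exact ⟨r, by rw [← hr]; rfl⟩

-- A's split value equals B's slice value on a matching tag
lemma pv_serv_val (t : String) (h : PySem.Str.startswith t "service:" = true) :
    PySem.List.pyGetD ((PySem.Str.splitMax? t ":" 1).getD []) 1 ""
      = PySem.Str.slice t (some (PySem.Str.len "service:")) none := by
  rcases pv_serv_decomp t h with ⟨r, hr⟩
  rw [pv_split_val t "service".toList r (by decide) hr]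
  rw [show PySem.Str.len "service:" = (("service:".toList.length : Nat) : Int) from rfl]
  rw [pv_slice_val t "service:".toList r (by rw [hr]; rfl)]

lemma pv_env_val (t : String) (h : PySem.Str.startswith t "env:" = true) :
    PySem.List.pyGetD ((PySem.Str.splitMax? t ":" 1).getD []) 1 ""
      = PySem.Str.slice t (some (PySem.Str.len "env:")) none := by
  rcases pv_env_decomp t h with ⟨r, hr⟩
  rw [pv_split_val t "env".toList r (by decide) hr]
  rw [show PySem.Str.len "env:" = (("env:".toList.length : Nat) : Int) from rfl]
  rw [pv_slice_val t "env:".toList r (by rw [hr]; rfl)]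

-- prepending a tag to the scanned list: pvLast checks it only when nothing later matched
lemma pv_last_cons (pfx d : String) (t : String) (rest : List String) :
    pvLast pfx d (t :: rest)
      = pvLast pfx (if PySem.Str.startswith t pfx then
                      PySem.Str.slice t (some (PySem.Str.len pfx)) none
                    else d) rest := by
  unfold pvLast
  rw [List.reverse_cons, List.find?_append]
  cases hf : rest.reverse.find? (fun tag => PySem.Str.startswith tag pfx) with
  | some u => simp [Option.or]
  | none =>
    by_cases ht : PySem.Chars.startswith t.toList pfx.toList = true
    · simp [List.find?, PySem.Str.startswith_eq, ht]
    · simp [List.find?, PySem.Str.startswith_eq, ht]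

-- A's forward fold from state (s, e) computes B's two backward scans with defaults s and e
lemma pv_main (tags : List String) (s e : String) :
    tags.foldl pvStepA (s, e) = (pvLast "service:" s tags, pvLast "env:" e tags) := by
  induction tags generalizing s e with
  | nil => simp [pvLast]
  | cons t rest ih =>
    rw [List.foldl_cons, pv_last_cons, pv_last_cons]
    by_cases h1 : PySem.Str.startswith t "service:" = true
    · have h2 : PySem.Str.startswith t "env:" = false := by
        rcases pv_serv_decomp t h1 with ⟨r, hr⟩
        rw [PySem.Str.startswith_eq]
        apply Bool.eq_false_iff.mpr
        intro hs
        rcases (PySem.Chars.startswith_iff _ _).mp hs with ⟨r2, hr2⟩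
        rw [hr] at hr2
        have h0 := congrArg (fun l => l[0]?) hr2
        simp at h0
      rw [show pvStepA (s, e) t
            = (PySem.Str.slice t (some (PySem.Str.len "service:")) none, e) from by
          unfold pvStepA; rw [if_pos h1, pv_serv_val t h1]]
      rw [ih, if_pos h1, if_neg (fun hs => by rw [h2] at hs; cases hs)]
    · by_cases h2 : PySem.Str.startswith t "env:" = true
      · rw [show pvStepA (s, e) t
              = (s, PySem.Str.slice t (some (PySem.Str.len "env:")) none) from by
            unfold pvStepA; rw [if_neg h1, if_pos h2, pv_env_val t h2]]
        rw [ih, if_neg h1, if_pos h2]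
      · rw [show pvStepA (s, e) t = (s, e) from by
            unfold pvStepA; rw [if_neg h1, if_neg h2]]
        rw [ih, if_neg h1, if_neg h2]

-- ===== VERDICT (by name: the statement is the Claim_ definition above) =====
theorem extract_service_env_py_spec : Claim_equal_extract_service_env_py := by
  intro tags _
  unfold Spec_extract_service_env_py extract_service_env_py extract_service_env_py_alt
  exact pv_main tags "unknown" "production"
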